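-- pv_equiv track=rewrite | github.com/kewh5868/SAXShell | src/saxshell/saxs/debye_waller/workflow.py | _hill_formula_from_counts
-- ===== SOURCE A (Python) =====
-- from collections import Counter, defaultdict
--
-- def _hill_formula_from_counts(counts: Counter[str]) -> str:
--     if not counts:
--         return "unknown"
--     ordered_symbols: list[str] = []
--     if "C" in counts:
--         ordered_symbols.append("C")
--         if "H" in counts:
--             ordered_symbols.append("H")
--     ordered_symbols.extend(
--         symbol
--         for symbol in sorted(counts)
--         if symbol not in {"C", "H"} and symbol
--     )
--     if "C" not in counts and "H" in counts:
--         ordered_symbols.insert(0, "H")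
--     parts: list[str] = []
--     for symbol in ordered_symbols:
--         count = int(counts[symbol])
--         parts.append(symbol if count == 1 else f"{symbol}{count}")
--     return "".join(parts) or "unknown"
-- ===== SOURCE B (Python) =====
-- def _hill_formula_from_counts(counts) -> str:
--     # Single pass: C and H parts are captured in dedicated slots while every other
--     # symbol's formatted part is binary-search-inserted into a sorted list as we go.
--     c_part = None
--     h_part = None
--     rest = []  # (symbol, part) pairs, kept sorted by symbol
--     for symbol in counts:
--         if not symbol:
--             continue
--         n = int(counts[symbol])
--         part = symbol if n == 1 else f"{symbol}{n}"
--         if symbol == "C":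
--             c_part = part
--         elif symbol == "H":
--             h_part = part
--         else:
--             lo, hi = 0, len(rest)
--             while lo < hi:
--                 mid = (lo + hi) // 2
--                 if rest[mid][0] < symbol:
--                     lo = mid + 1
--                 else:
--                     hi = mid
--             rest.insert(lo, (symbol, part))
--     out = (c_part or "") + (h_part or "") + "".join(p for _, p in rest)
--     return out or "unknown"
-- ===== Notes on version B (the rewrite author's own statement) =====
-- stated objective: alternative
-- what changed: Replaces A's staged pipeline (build an ordered symbol list via sorted() plus C/H append/extend/insert-at-front branching, then a second formatting loop) with a single pass over the dict that formats each entry immediately, capturing C and H in dedicated slots and binary-search-inserting every other formatted part into a sorted list as it goes; no library sort and no separate formatting pass.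
import Mathlib
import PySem

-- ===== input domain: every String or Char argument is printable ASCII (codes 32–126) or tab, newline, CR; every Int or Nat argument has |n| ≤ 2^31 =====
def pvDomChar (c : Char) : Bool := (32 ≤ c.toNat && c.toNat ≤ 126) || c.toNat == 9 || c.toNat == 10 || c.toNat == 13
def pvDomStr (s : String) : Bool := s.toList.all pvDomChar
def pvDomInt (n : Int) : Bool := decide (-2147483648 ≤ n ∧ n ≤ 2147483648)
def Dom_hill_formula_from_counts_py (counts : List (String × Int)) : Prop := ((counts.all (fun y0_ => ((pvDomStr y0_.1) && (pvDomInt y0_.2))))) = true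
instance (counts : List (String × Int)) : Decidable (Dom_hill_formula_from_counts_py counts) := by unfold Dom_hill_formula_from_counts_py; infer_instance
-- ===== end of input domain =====

-- B replaces A's staged pipeline (sorted key list assembled by C/H branching, then a second
-- formatting loop) with a single pass that formats each entry immediately, holding C/H parts
-- in dedicated slots and insertion-sorting the other formatted parts (objective: alternative).

-- ===== PORT A =====
def hill_formula_from_counts_py (counts : List (String × Int)) : String :=
  let d := PySem.Dict.ofList counts
  if d.items.isEmpty then "unknown" else
  let ordered : List String :=
    if d.contains "C" then
      ["C"] ++ (if d.contains "H" then ["H"] else [])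
    else []
  let ordered := ordered ++
    (PySem.List.sorted d.keys (fun s => s)).filter
      (fun s => !(s == "C" || s == "H") && !(s == ""))
  let ordered := if !d.contains "C" && d.contains "H" then PySem.List.insert ordered 0 "H" else ordered
  let parts : List String := ordered.foldl (fun acc symbol =>
    let count := d.getD symbol 0
    acc ++ [if count == 1 then symbol else symbol ++ PySem.Int.toStr count]) []
  let joined := PySem.Str.join "" parts
  if joined == "" then "unknown" else joined

-- ===== PORT B =====
-- the 'while lo < hi' binary search of B: lower-bound index for symbol among the pairs' keys
-- (lo, hi, mid are nonnegative Python ints; Nat arithmetic with / = Python's // is exact here,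
--  and rest[mid] is in range, ported via PySem.List.pyGetD)
def bsIdx (rest : List (String × String)) (symbol : String) (lo hi : Nat) : Nat :=
  if _h : lo < hi then
    let mid := (lo + hi) / 2
    if (PySem.List.pyGetD rest (mid : Int) ("", "")).1 < symbol then bsIdx rest symbol (mid + 1) hi
    else bsIdx rest symbol lo mid
  else lo
termination_by hi - lo
decreasing_by all_goals omega

-- one loop iteration of B: format the entry, route it to the C slot, the H slot, or
-- binary-search-insert it into the sorted rest
def hillStep (st : Option String × Option String × List (String × String))
    (it : String × Int) : Option String × Option String × List (String × String) :=
  if it.1 == "" then st else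
  let part := if it.2 == 1 then it.1 else it.1 ++ PySem.Int.toStr it.2
  if it.1 == "C" then (some part, st.2.1, st.2.2)
  else if it.1 == "H" then (st.1, some part, st.2.2)
  else (st.1, st.2.1,
    PySem.List.insert st.2.2 (bsIdx st.2.2 it.1 0 st.2.2.length : Int) (it.1, part))

def hill_formula_from_counts_py_alt (counts : List (String × Int)) : String :=
  let d := PySem.Dict.ofList counts
  let st := d.items.foldl hillStep (none, none, [])
  let out := st.1.getD "" ++ st.2.1.getD "" ++ PySem.Str.join "" (st.2.2.map (·.2))
  if out == "" then "unknown" else out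

-- ===== PRECONDITION & SPEC =====
def Spec_hill_formula_from_counts_py (counts : List (String × Int)) (out : String) : Prop := out = hill_formula_from_counts_py_alt counts
instance (counts : List (String × Int)) (out : String) : Decidable (Spec_hill_formula_from_counts_py counts out) := by unfold Spec_hill_formula_from_counts_py; infer_instance

-- ===== CLAIM (what is proved, stated in full; the proofs are below) =====
def Claim_equal_hill_formula_from_counts_py : Prop := ∀ (counts : List (String × Int)), Dom_hill_formula_from_counts_py counts → Spec_hill_formula_from_counts_py counts (hill_formula_from_counts_py counts)

-- ===== LEMMAS AND PROOFS =====

-- the formatted part of an entry, as B computes it from the (key, value) pair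
def partFn (it : String × Int) : String :=
  if it.2 == 1 then it.1 else it.1 ++ PySem.Int.toStr it.2

-- the formatted part as A computes it, by dict lookup
def partD (d : PySem.Dict String Int) (symbol : String) : String :=
  if d.getD symbol 0 == 1 then symbol else symbol ++ PySem.Int.toStr (d.getD symbol 0)

def restPred (s : String) : Bool := !(s == "C" || s == "H") && !(s == "")

-- proof-side model of the insertion: the linear-scan insert at the sorted position
def hillInsert (s p : String) : List (String × String) → List (String × String)
  | [] => [(s, p)]
  | (t, q) :: rest => if t < s then (t, q) :: hillInsert s p rest else (s, p) :: (t, q) :: rest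

-- the binary search returns a lower-bound index on a strictly key-sorted list
lemma bsIdx_spec (rest : List (String × String)) (symbol : String)
    (hpw : rest.Pairwise (fun a b => a.1 < b.1)) :
    ∀ (n lo hi : Nat), hi - lo ≤ n → lo ≤ hi → hi ≤ rest.length →
      (∀ j, j < lo → (rest.getD j ("", "")).1 < symbol) →
      (∀ j, hi ≤ j → j < rest.length → ¬ (rest.getD j ("", "")).1 < symbol) →
      bsIdx rest symbol lo hi ≤ rest.length ∧
        (∀ j, j < bsIdx rest symbol lo hi → (rest.getD j ("", "")).1 < symbol) ∧
        (∀ j, bsIdx rest symbol lo hi ≤ j → j < rest.length →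
          ¬ (rest.getD j ("", "")).1 < symbol) := by
  intro n
  induction n with
  | zero =>
    intro lo hi hk hle hhi hpre hsuf
    have : lo = hi := by omega
    subst this
    rw [bsIdx, dif_neg (by omega)]
    exact ⟨by omega, hpre, hsuf⟩
  | succ n ih =>
    intro lo hi hk hle hhi hpre hsuf
    by_cases h : lo < hi
    · rw [bsIdx, dif_pos h]
      have hmid1 : lo ≤ (lo + hi) / 2 := by omega
      have hmid2 : (lo + hi) / 2 < hi := by omega
      have hmidlen : (lo + hi) / 2 < rest.length := by omega
      have hget : PySem.List.pyGetD rest (((lo + hi) / 2 : Nat) : Int) ("", "") =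
          rest.getD ((lo + hi) / 2) ("", "") := PySem.List.pyGetD_natCast rest _ _
      by_cases hcmp : (rest.getD ((lo + hi) / 2) ("", "")).1 < symbol
      · rw [if_pos (by rw [hget]; exact hcmp)]
        refine ih ((lo + hi) / 2 + 1) hi (by omega) (by omega) hhi ?_ hsuf
        intro j hj
        rcases Nat.lt_or_ge j lo with hj' | hj'
        · exact hpre j hj'
        · rcases Nat.eq_or_lt_of_le (Nat.le_of_lt_succ hj) with he | hlt
          · rw [he]; exact hcmp
          · have hjlen : j < rest.length := by omega
            have hrel := (List.pairwise_iff_getElem.mp hpw) j ((lo + hi) / 2) hjlen hmidlen hlt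
            have hgj : rest.getD j ("", "") = rest[j] := List.getD_eq_getElem rest _ hjlen
            have hgm : rest.getD ((lo + hi) / 2) ("", "") = rest[(lo + hi) / 2] :=
              List.getD_eq_getElem rest _ hmidlen
            rw [hgj]
            rw [hgm] at hcmp
            exact lt_trans hrel hcmp
      · rw [if_neg (by rw [hget]; exact hcmp)]
        refine ih lo ((lo + hi) / 2) (by omega) (by omega) (by omega) hpre ?_
        intro j hj hjlen hlt
        rcases Nat.eq_or_lt_of_le hj with he | hgt
        · rw [he] at hcmp; exact hcmp hlt
        · have hrel := (List.pairwise_iff_getElem.mp hpw) ((lo + hi) / 2) j hmidlen hjlen hgt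
          have hgj : rest.getD j ("", "") = rest[j] := List.getD_eq_getElem rest _ hjlen
          have hgm : rest.getD ((lo + hi) / 2) ("", "") = rest[(lo + hi) / 2] :=
            List.getD_eq_getElem rest _ hmidlen
          rw [hgj] at hlt
          rw [hgm] at hcmp
          exact hcmp (lt_trans hrel hlt)
    · rw [bsIdx, dif_neg h]
      have : lo = hi := by omega
      exact ⟨by omega, hpre, by rw [this]; exact hsuf⟩

-- splitting at a lower-bound index is exactly the linear-scan insertion
lemma hillInsert_eq_take_drop (s p : String) (rest : List (String × String)) :
    ∀ r, r ≤ rest.length →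
      (∀ j, j < r → (rest.getD j ("", "")).1 < s) →
      (∀ j, r ≤ j → j < rest.length → ¬ (rest.getD j ("", "")).1 < s) →
      rest.take r ++ (s, p) :: rest.drop r = hillInsert s p rest := by
  induction rest with
  | nil =>
    intro r hr _ _
    have : r = 0 := by simpa using hr
    subst this
    rfl
  | cons hd tl ih =>
    obtain ⟨t, q⟩ := hd
    intro r hr hpre hsuf
    by_cases hts : t < s
    · have hr0 : r ≠ 0 := by
        intro h0
        exact hsuf 0 (by omega) (by simp) (by simpa using hts)
      obtain ⟨r', rfl⟩ := Nat.exists_eq_succ_of_ne_zero hr0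
      simp only [List.take_succ_cons, List.drop_succ_cons, List.cons_append]
      rw [hillInsert, if_pos hts]
      refine congrArg _ (ih r' (by simpa using hr) ?_ ?_)
      · intro j hj; exact hpre (j + 1) (by omega)
      · intro j hj hjlen
        have := hsuf (j + 1) (by omega) (by simpa using hjlen)
        simpa using this
    · have hr0 : r = 0 := by
        by_contra h0
        exact hts (by simpa using hpre 0 (by omega))
      subst hr0
      simp only [List.take_zero, List.drop_zero, List.nil_append]
      rw [hillInsert, if_neg hts]

-- hillStep's insertion branch IS the linear-scan insertion, on a sorted rest
lemma hillStep_else (cp hp : Option String) (rest : List (String × String)) (x : String × Int)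
    (hpw : rest.Pairwise (fun a b => a.1 < b.1))
    (h0 : ¬ x.1 = "") (hC : ¬ x.1 = "C") (hH : ¬ x.1 = "H") :
    hillStep (cp, hp, rest) x = (cp, hp, hillInsert x.1 (partFn x) rest) := by
  obtain ⟨hle, hpre, hsuf⟩ := bsIdx_spec rest x.1 hpw (rest.length) 0 rest.length
    (by omega) (by omega) (by omega) (by omega) (fun j hj hjlen => by omega)
  have hins : PySem.List.insert rest ((bsIdx rest x.1 0 rest.length : Nat) : Int)
      (x.1, partFn x) = hillInsert x.1 (partFn x) rest := by
    rw [PySem.List.insert_natCast rest _ _ hle]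
    exact hillInsert_eq_take_drop x.1 (partFn x) rest _ hle hpre hsuf
  simp only [hillStep, partFn] at hins ⊢
  simp [h0, hC, hH] at hins ⊢
  exact hins

lemma hillInsert_perm (s p : String) (rest : List (String × String)) :
    List.Perm (hillInsert s p rest) ((s, p) :: rest) := by
  induction rest with
  | nil => simp [hillInsert]
  | cons hd tl ih =>
    obtain ⟨t, q⟩ := hd
    simp only [hillInsert]
    split_ifs with h
    · exact ((ih.cons (t, q)).trans (List.Perm.swap _ _ _))
    · exact List.Perm.refl _

lemma hillInsert_pairwise (s p : String) (rest : List (String × String))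
    (hpw : rest.Pairwise (fun a b => a.1 < b.1)) (hnm : ∀ q ∈ rest, q.1 ≠ s) :
    (hillInsert s p rest).Pairwise (fun a b => a.1 < b.1) := by
  induction rest with
  | nil => simp [hillInsert]
  | cons hd tl ih =>
    obtain ⟨t, q⟩ := hd
    rw [List.pairwise_cons] at hpw
    simp only [hillInsert]
    split_ifs with h
    · refine List.Pairwise.cons ?_ (ih hpw.2 (fun q hq => hnm q (List.mem_cons_of_mem _ hq)))
      intro a ha
      rcases List.mem_cons.mp ((hillInsert_perm s p tl).mem_iff.mp ha) with h' | h'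
      · subst h'; exact h
      · exact hpw.1 a h'
    · have hts : s < t := lt_of_le_of_ne (not_lt.mp h) (Ne.symm (hnm (t, q) (by simp)))
      refine List.Pairwise.cons ?_ (List.Pairwise.cons hpw.1 hpw.2)
      intro a ha
      rcases List.mem_cons.mp ha with h' | h'
      · subst h'; exact hts
      · exact lt_trans hts (hpw.1 a h')

-- the characterisation of B's fold: slots hold the (unique) C/H parts, rest is a sorted
-- permutation of the other formatted entries
lemma foldB_spec (l : List (String × Int)) (cp hp : Option String) (rest : List (String × String))
    (hnd : (l.map Prod.fst).Nodup)
    (hdisj : ∀ q ∈ rest, q.1 ∉ l.map Prod.fst)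
    (hpw : rest.Pairwise (fun a b => a.1 < b.1)) :
    ∃ rest', l.foldl hillStep (cp, hp, rest) =
      ((l.find? (fun it => it.1 == "C")).elim cp (fun it => some (partFn it)),
       (l.find? (fun it => it.1 == "H")).elim hp (fun it => some (partFn it)),
       rest') ∧
      List.Perm rest' (rest ++ (l.filter (fun it => restPred it.1)).map (fun it => (it.1, partFn it))) ∧
      rest'.Pairwise (fun a b => a.1 < b.1) := by
  induction l generalizing cp hp rest with
  | nil => exact ⟨rest, rfl, by simp, hpw⟩
  | cons x xs ih =>
    simp only [List.map_cons, List.nodup_cons] at hnd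
    obtain ⟨hx_not, hnd'⟩ := hnd
    have hdisj' : ∀ q ∈ rest, q.1 ∉ xs.map Prod.fst := by
      intro q hq hmem; exact hdisj q hq (by simp [hmem])
    rw [List.foldl_cons]
    by_cases h0 : x.1 = ""
    · have hstep : hillStep (cp, hp, rest) x = (cp, hp, rest) := by simp [hillStep, h0]
      rw [hstep]
      obtain ⟨rest', heq, hperm, hpw'⟩ := ih cp hp rest hnd' hdisj' hpw
      refine ⟨rest', ?_, ?_, hpw'⟩
      · rw [heq,
          List.find?_cons_of_neg (by simp [h0]),
          List.find?_cons_of_neg (by simp [h0])]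
      · rwa [List.filter_cons_of_neg (by simp [restPred, h0])]
    · by_cases hC : x.1 = "C"
      · have hstep : hillStep (cp, hp, rest) x = (some (partFn x), hp, rest) := by
          simp [hillStep, partFn, hC]
        rw [hstep]
        obtain ⟨rest', heq, hperm, hpw'⟩ := ih (some (partFn x)) hp rest hnd' hdisj' hpw
        refine ⟨rest', ?_, ?_, hpw'⟩
        · rw [heq,
            List.find?_cons_of_pos (by simp [hC]),
            List.find?_cons_of_neg (by simp [hC]),
            List.find?_eq_none.mpr (fun it hit => by
              simp only [beq_iff_eq]
              intro h'
              exact hx_not (by rw [hC, ← h']; exact List.mem_map_of_mem hit))]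
          rfl
        · rwa [List.filter_cons_of_neg (by simp [restPred, hC])]
      · by_cases hH : x.1 = "H"
        · have hstep : hillStep (cp, hp, rest) x = (cp, some (partFn x), rest) := by
            simp [hillStep, partFn, hH]
          rw [hstep]
          obtain ⟨rest', heq, hperm, hpw'⟩ := ih cp (some (partFn x)) rest hnd' hdisj' hpw
          refine ⟨rest', ?_, ?_, hpw'⟩
          · have h3 : List.find? (fun it => it.1 == "H") xs = none :=
              List.find?_eq_none.mpr (fun it hit => by
                simp only [beq_iff_eq]
                intro h'
                exact hx_not (by rw [hH, ← h']; exact List.mem_map_of_mem hit))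
            rw [heq, h3,
              List.find?_cons_of_neg (by simp [hC]),
              List.find?_cons_of_pos (by simp [hH])]
            rfl
          · rwa [List.filter_cons_of_neg (by simp [restPred, hH])]
        · rw [hillStep_else cp hp rest x hpw h0 hC hH]
          have hdisj2 : ∀ q ∈ hillInsert x.1 (partFn x) rest, q.1 ∉ xs.map Prod.fst := by
            intro q hq hmem
            rcases List.mem_cons.mp ((hillInsert_perm _ _ rest).mem_iff.mp hq) with h' | h'
            · subst h'; exact hx_not hmem
            · exact hdisj' q h' hmem
          have hpw2 : (hillInsert x.1 (partFn x) rest).Pairwise (fun a b => a.1 < b.1) :=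
            hillInsert_pairwise _ _ rest hpw
              (fun q hq he => hdisj q hq (by simp [he]))
          obtain ⟨rest', heq, hperm, hpw'⟩ := ih cp hp _ hnd' hdisj2 hpw2
          refine ⟨rest', ?_, ?_, hpw'⟩
          · rw [heq,
              List.find?_cons_of_neg (by simp [hC]),
              List.find?_cons_of_neg (by simp [hH])]
          · rw [List.filter_cons_of_pos (by simp [restPred, h0, hC, hH]), List.map_cons]
            exact hperm.trans ((List.Perm.append_right _ (hillInsert_perm _ _ rest)).trans
              List.perm_middle.symm)

-- intercalating with the empty separator is flattening
lemma intercalate_nil_flatten (l : List (List Char)) :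
    ([].intercalate l : List Char) = l.flatten := by
  induction l with
  | nil => simp [List.intercalate]
  | cons x l ih =>
    cases l with
    | nil => simp [List.intercalate]
    | cons y l => simp [List.intercalate] at ih ⊢; simpa using ih

-- joining with "" distributes over append
lemma join_empty_append (a b : List String) :
    PySem.Str.join "" (a ++ b) = PySem.Str.join "" a ++ PySem.Str.join "" b := by
  apply String.ext
  rw [String.toList_append, PySem.Str.toList_join, PySem.Str.toList_join, PySem.Str.toList_join]
  simp [PySem.Chars.join, intercalate_nil_flatten]

lemma join_empty_singleton (x : String) : PySem.Str.join "" [x] = x := by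
  apply String.ext
  rw [PySem.Str.toList_join]
  simp [PySem.Chars.join, intercalate_nil_flatten]

lemma partD_eta (d : PySem.Dict String Int) :
    partD d = fun symbol =>
      if d.getD symbol 0 == 1 then symbol else symbol ++ PySem.Int.toStr (d.getD symbol 0) := rfl

lemma restPred_eta : restPred = fun s => !(s == "C" || s == "H") && !(s == "") := rfl

-- a list of pairs whose second components are determined by the first projects to a map
lemma map_snd_eq_map_partD (d : PySem.Dict String Int) (l : List (String × String))
    (h : ∀ p ∈ l, p.2 = partD d p.1) :
    l.map (·.2) = (l.map (·.1)).map (partD d) := by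
  induction l with
  | nil => rfl
  | cons hd tl ih =>
    simp only [List.map_cons]
    rw [h hd (by simp), ih (fun p hp => h p (by simp [hp]))]

-- find? on a dict's items with nodup keys
lemma find?_items_of_mem (d : PySem.Dict String Int) (k : String)
    (hnd : d.keys.Nodup) (hk : k ∈ d.keys) :
    d.items.find? (fun it => it.1 == k) = some (k, d.getD k 0) := by
  have hk' : k ∈ d.items.map Prod.fst := by simpa [PySem.Dict.keys] using hk
  obtain ⟨p, hp, hpk⟩ := List.mem_map.mp hk'
  cases hfind : d.items.find? (fun it => it.1 == k) with
  | none =>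
    have := List.find?_eq_none.mp hfind p hp
    simp [hpk] at this
  | some q =>
    have hq_mem := List.mem_of_find?_eq_some hfind
    have hq1 : q.1 = k := by simpa using List.find?_some hfind
    have hmem : (k, q.2) ∈ d.items := by rw [← hq1]; simpa using hq_mem
    have hgd := PySem.Dict.getD_of_mem_items d hmem hnd 0
    rw [hgd, ← hq1]

lemma find?_items_of_not_mem (d : PySem.Dict String Int) (k : String)
    (hk : k ∈ d.keys → False) :
    d.items.find? (fun it => it.1 == k) = none := by
  refine List.find?_eq_none.mpr (fun it hit => ?_)
  simp only [beq_iff_eq]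
  intro h'
  exact hk (by rw [← h']; simpa [PySem.Dict.keys] using List.mem_map_of_mem (f := Prod.fst) hit)

-- ===== VERDICT (by name: the statement is the Claim_ definition above) =====
theorem hill_formula_from_counts_py_spec : Claim_equal_hill_formula_from_counts_py := by
  intro counts _
  unfold Spec_hill_formula_from_counts_py
  set d := PySem.Dict.ofList counts with hd
  have hnd : d.keys.Nodup := PySem.Dict.nodup_keys_ofList counts
  have hnd' : (d.items.map Prod.fst).Nodup := by simpa [PySem.Dict.keys] using hnd
  obtain ⟨rest', heq, hperm, hpw'⟩ := foldB_spec d.items none none [] hnd' (by simp) (by simp)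
  rw [List.nil_append] at hperm
  -- every pair in rest' is (symbol, its A-style formatted part)
  have hmemform : ∀ p ∈ rest', p.2 = partD d p.1 := by
    intro p hp
    obtain ⟨it, hit, hpe⟩ := List.mem_map.mp (hperm.mem_iff.mp hp)
    have hgd : d.getD it.1 0 = it.2 :=
      PySem.Dict.getD_of_mem_items d (by simpa using (List.mem_filter.mp hit).1) hnd 0
    rw [← hpe]
    simp [partFn, partD, hgd]
  -- rest' lists exactly A's sorted filtered symbols
  have hfst : rest'.map (·.1) = (PySem.List.sorted d.keys (fun s => s)).filter restPred := by
    have hkeys : d.items.map Prod.fst = d.keys := by simp [PySem.Dict.keys]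
    have h1 : List.Perm (rest'.map (·.1)) (d.keys.filter restPred) := by
      refine (hperm.map (·.1)).trans ?_
      rw [List.map_map]
      have : (d.items.filter (fun it => restPred it.1)).map ((·.1) ∘ (fun it : String × Int => (it.1, partFn it))) =
          (d.items.map Prod.fst).filter restPred := by
        rw [List.filter_map]
        rfl
      rw [this, hkeys]
    have h2 : List.Perm ((PySem.List.sorted d.keys (fun s => s)).filter restPred)
        (d.keys.filter restPred) := (PySem.List.sorted_perm d.keys _ false).filter _
    have hsnd : (rest'.map (·.1)).Pairwise (· < ·) :=
      List.Pairwise.map _ (fun a b h => h) hpw'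
    have hsorted_nd : (PySem.List.sorted d.keys (fun s => s) false).Nodup :=
      ((PySem.List.sorted_perm d.keys (fun s => s) false).nodup_iff).mpr hnd
    have hsf : ((PySem.List.sorted d.keys (fun s => s)).filter restPred).Pairwise (· < ·) := by
      have hle : ((PySem.List.sorted d.keys (fun s => s)).filter restPred).Pairwise (· ≤ ·) :=
        List.Pairwise.sublist List.filter_sublist (PySem.List.sorted_pairwise d.keys (fun s => s))
      have hnd2 : ((PySem.List.sorted d.keys (fun s => s)).filter restPred).Nodup :=
        List.Nodup.sublist List.filter_sublist hsorted_nd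
      exact (hle.and hnd2).imp (fun h => lt_of_le_of_ne h.1 h.2)
    exact List.Perm.eq_of_pairwise
      (fun a b _ _ h1 h2 => absurd h1 (lt_asymm h2)) hsnd hsf (h1.trans h2.symm)
  have hsnd_eq : rest'.map (·.2) =
      ((PySem.List.sorted d.keys (fun s => s)).filter restPred).map (partD d) := by
    rw [map_snd_eq_map_partD d rest' hmemform, hfst]
  have hjoin_nil : PySem.Str.join "" [] = "" := by
    apply String.ext
    rw [PySem.Str.toList_join]
    simp [PySem.Chars.join, intercalate_nil_flatten]
  by_cases hemp : d.items = []
  · rw [show hill_formula_from_counts_py counts = "unknown" by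
        simp [hill_formula_from_counts_py, ← hd, hemp],
      show hill_formula_from_counts_py_alt counts = "unknown" by
        simp [hill_formula_from_counts_py_alt, ← hd, hemp, hjoin_nil]]
  · have hne : d.items.isEmpty = false := by simpa using hemp
    have hA : hill_formula_from_counts_py counts =
        (if PySem.Str.join "" (((if "C" ∈ d.keys then ["C"] else []) ++
              ((if "H" ∈ d.keys then ["H"] else []) ++
                (PySem.List.sorted d.keys (fun s => s)).filter restPred)).map (partD d)) == ""
          then "unknown"
          else PySem.Str.join "" (((if "C" ∈ d.keys then ["C"] else []) ++
              ((if "H" ∈ d.keys then ["H"] else []) ++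
                (PySem.List.sorted d.keys (fun s => s)).filter restPred)).map (partD d))) := by
      simp only [hill_formula_from_counts_py]
      rw [← hd, hne]
      simp only [Bool.false_eq_true, if_false, PySem.Dict.contains_eq_decide_mem_keys,
        PySem.List.foldl_append_singleton_eq_map]
      by_cases hC : "C" ∈ d.keys <;> by_cases hH : "H" ∈ d.keys <;>
        simp [hC, hH, PySem.List.insert_zero, partD_eta, restPred_eta]
    have hB : hill_formula_from_counts_py_alt counts =
        (if (((d.items.find? (fun it => it.1 == "C")).elim none (fun it => some (partFn it))).getD "" ++
             ((d.items.find? (fun it => it.1 == "H")).elim none (fun it => some (partFn it))).getD "" ++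
              PySem.Str.join "" (rest'.map (·.2))) == ""
          then "unknown"
          else (((d.items.find? (fun it => it.1 == "C")).elim none (fun it => some (partFn it))).getD "" ++
             ((d.items.find? (fun it => it.1 == "H")).elim none (fun it => some (partFn it))).getD "" ++
              PySem.Str.join "" (rest'.map (·.2)))) := by
      simp only [hill_formula_from_counts_py_alt]
      rw [← hd, heq]
    have hout : PySem.Str.join "" (((if "C" ∈ d.keys then ["C"] else []) ++
          ((if "H" ∈ d.keys then ["H"] else []) ++
            (PySem.List.sorted d.keys (fun s => s)).filter restPred)).map (partD d)) =
        ((d.items.find? (fun it => it.1 == "C")).elim none (fun it => some (partFn it))).getD "" ++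
          ((d.items.find? (fun it => it.1 == "H")).elim none (fun it => some (partFn it))).getD "" ++
            PySem.Str.join "" (rest'.map (·.2)) := by
      rw [List.map_append, List.map_append, join_empty_append, join_empty_append, hsnd_eq,
        ← String.append_assoc]
      congr 1
      congr 1
      · by_cases hC : "C" ∈ d.keys
        · rw [find?_items_of_mem d "C" hnd hC]
          simp [hC, join_empty_singleton, partFn, partD]
        · rw [find?_items_of_not_mem d "C" hC]
          simp [hC, hjoin_nil]
      · by_cases hH : "H" ∈ d.keys
        · rw [find?_items_of_mem d "H" hnd hH]
          simp [hH, join_empty_singleton, partFn, partD]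
        · rw [find?_items_of_not_mem d "H" hH]
          simp [hH, hjoin_nil]
    rw [hA, hB, hout]
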